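-- pv_equiv track=rewrite | github.com/pypi-data/pypi-mirror-203 | packages/uic/uic-0.0.1-py3-none-any.whl/uic/__init__.py | create_wagonnumber
-- ===== SOURCE A (Python) =====
-- def create_wagonnumber(wagonnumber_pattern, comb):
--     """Create a wagonnumber by replacing the questionmarks "?" in a given
--     wagonnumber pattern by the digits given by the list *comb*. The number of
--     questionmarks and the length of *comb* have to agree.
--
--     Note: The resulting wagon number is not checked for integrity.
--
--     Example usage:
--
--     >>> create_wagonnumber('12? 00?-1', [0, 2])
--     '120 002-1'"""
--     # 2014-02-01
--     qnum = wagonnumber_pattern.count('?')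
--     if qnum != len(comb):
--         raise ValueError('unexpected number of placeholders "?" in ' +
--                          'wagonnumber pattern')
--     out = ''
--     for char in wagonnumber_pattern:
--         if char == '?':
--             out += str(comb[0])
--             comb = comb[1:]
--         else:
--             out += char
--     return out
-- ===== SOURCE B (Python) =====
-- def create_wagonnumber(wagonnumber_pattern, comb):
--     """Segment-wise re-implementation: split the pattern on '?' and
--     interleave the digits with the fixed segments, joining once."""
--     if wagonnumber_pattern.count('?') != len(comb):
--         raise ValueError('unexpected number of placeholders "?" in ' +
--                          'wagonnumber pattern')
--     parts = wagonnumber_pattern.split('?')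
--     pieces = [parts[0]]
--     for digit, part in zip(comb, parts[1:]):
--         pieces.append(str(digit))
--         pieces.append(part)
--     return ''.join(pieces)
-- ===== Notes on version B (the rewrite author's own statement) =====
-- stated objective: idiomatic
-- what changed: B keeps A's ValueError guard but replaces the per-character loop that consumes comb by repeated slicing with a split of the pattern on '?' and a zip of the digits with the segments, joined once.
import Mathlib
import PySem

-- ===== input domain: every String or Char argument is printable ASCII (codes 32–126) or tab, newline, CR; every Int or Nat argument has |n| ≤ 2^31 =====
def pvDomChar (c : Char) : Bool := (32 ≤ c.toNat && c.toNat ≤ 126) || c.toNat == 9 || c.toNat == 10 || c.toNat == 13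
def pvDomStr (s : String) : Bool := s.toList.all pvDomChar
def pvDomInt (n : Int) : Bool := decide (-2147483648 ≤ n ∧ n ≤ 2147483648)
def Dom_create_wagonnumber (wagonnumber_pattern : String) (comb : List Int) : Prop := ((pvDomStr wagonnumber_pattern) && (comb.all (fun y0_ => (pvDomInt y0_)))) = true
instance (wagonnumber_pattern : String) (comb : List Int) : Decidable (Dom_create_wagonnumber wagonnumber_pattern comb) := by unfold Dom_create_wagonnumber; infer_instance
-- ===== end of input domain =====

-- B replaces A's per-character scan-and-consume loop by splitting the pattern on '?'
-- and interleaving the digits with the fixed segments (objective: idiomatic decomposition).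

-- ===== PORT A =====
-- A raises ValueError when the '?'-count differs from len(comb); those inputs are
-- excluded by Pre_. Under Pre_ the '?' branch never sees an empty comb, so 'headD 0'
-- stands for Python's comb[0] (exact on every input Pre_ admits); comb[1:] is 'drop 1'.
def create_wagonnumber (wagonnumber_pattern : String) (comb : List Int) : String :=
  String.mk ((wagonnumber_pattern.toList.foldl
      (fun (st : List Char × List Int) char =>
        if char == '?' then (st.1 ++ PySem.Int.toChars (st.2.headD 0), st.2.drop 1)
        else (st.1 ++ [char], st.2))
      (([] : List Char), comb)).1)

-- ===== PORT B =====
-- Same ValueError guard as A (inputs where it fires are excluded by Pre_).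
-- parts = pattern.split('?') is List.splitOn '?'; pieces grows as in Source B's loop;
-- ''.join(pieces) is PySem.Chars.join [].
def create_wagonnumber_alt (wagonnumber_pattern : String) (comb : List Int) : String :=
  let parts := wagonnumber_pattern.toList.splitOn '?'
  let pieces := (comb.zip parts.tail).foldl
      (fun (ps : List (List Char)) dp => ps ++ [PySem.Int.toChars dp.1, dp.2])
      [parts.headI]
  String.mk (PySem.Chars.join [] pieces)

-- ===== PRECONDITION & SPEC =====
-- Pre_ excludes exactly the inputs where the number of '?' in the pattern differs
-- from len(comb): there both A and B raise ValueError.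
def Pre_create_wagonnumber (wagonnumber_pattern : String) (comb : List Int) : Prop :=
  wagonnumber_pattern.toList.count '?' = comb.length
instance (wagonnumber_pattern : String) (comb : List Int) : Decidable (Pre_create_wagonnumber wagonnumber_pattern comb) := by unfold Pre_create_wagonnumber; infer_instance

def pvWitness_create_wagonnumber : String × List Int := ("12? 00?-1", [0, 2])

def Spec_create_wagonnumber (wagonnumber_pattern : String) (comb : List Int) (out : String) : Prop := out = create_wagonnumber_alt wagonnumber_pattern comb
instance (wagonnumber_pattern : String) (comb : List Int) (out : String) : Decidable (Spec_create_wagonnumber wagonnumber_pattern comb out) := by unfold Spec_create_wagonnumber; infer_instance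

-- ===== CLAIM (what is proved, stated in full; the proofs are below) =====
def Claim_equal_create_wagonnumber : Prop := ∀ (wagonnumber_pattern : String) (comb : List Int), Dom_create_wagonnumber wagonnumber_pattern comb → Pre_create_wagonnumber wagonnumber_pattern comb → Spec_create_wagonnumber wagonnumber_pattern comb (create_wagonnumber wagonnumber_pattern comb)

-- ===== LEMMAS AND PROOFS =====

theorem pv_splitOn_ne_nil (cs : List Char) : cs.splitOn '?' ≠ [] := by
  simp only [List.splitOn]
  induction cs with
  | nil => simp
  | cons c cs ih => rw [List.splitOnP_cons]; split <;> simp_all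

theorem pv_splitOn_cons_sep (cs : List Char) :
    ('?' :: cs).splitOn '?' = [] :: cs.splitOn '?' := by
  simp [List.splitOn, List.splitOnP_cons]

theorem pv_splitOn_cons_ne (c : Char) (cs : List Char) (h : (c == '?') = false) :
    (c :: cs).splitOn '?' = (c :: (cs.splitOn '?').headI) :: (cs.splitOn '?').tail := by
  simp only [List.splitOn, List.splitOnP_cons, h]
  obtain ⟨p0, rest, hpr⟩ := List.exists_cons_of_ne_nil (pv_splitOn_ne_nil cs)
  simp only [List.splitOn] at hpr
  rw [hpr]; rfl

-- B's value, written as head segment ++ interleaving of digits with the remaining segments.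
def pvInterleave (parts : List (List Char)) (comb : List Int) : List Char :=
  parts.headI ++ (comb.zip parts.tail).flatMap (fun dp => PySem.Int.toChars dp.1 ++ dp.2)

theorem pv_join_nil_eq_flatten (xs : List (List Char)) :
    PySem.Chars.join [] xs = xs.flatten := by
  induction xs with
  | nil => simp [PySem.Chars.join, List.intercalate]
  | cons a t ih =>
    cases t with
    | nil => simp [PySem.Chars.join, List.intercalate]
    | cons b t' =>
      rw [PySem.Chars.join_cons_cons]
      simp only [List.flatten_cons, List.append_nil]
      rw [← List.flatten_cons, ← ih]

theorem pv_foldl_pieces (l : List (Int × List Char)) (init : List (List Char)) :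
    (l.foldl (fun (ps : List (List Char)) dp => ps ++ [PySem.Int.toChars dp.1, dp.2]) init).flatten
      = init.flatten ++ l.flatMap (fun dp => PySem.Int.toChars dp.1 ++ dp.2) := by
  induction l generalizing init with
  | nil => simp
  | cons dp l ih => rw [List.foldl_cons, ih]; simp


theorem pv_alt_eq (wagonnumber_pattern : String) (comb : List Int) :
    create_wagonnumber_alt wagonnumber_pattern comb
      = String.mk (pvInterleave (wagonnumber_pattern.toList.splitOn '?') comb) := by
  unfold create_wagonnumber_alt pvInterleave
  simp only [pv_join_nil_eq_flatten, pv_foldl_pieces]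
  simp

theorem pv_main (cs : List Char) : ∀ (comb : List Int) (acc : List Char),
    cs.count '?' = comb.length →
    (cs.foldl
      (fun (st : List Char × List Int) char =>
        if char == '?' then (st.1 ++ PySem.Int.toChars (st.2.headD 0), st.2.drop 1)
        else (st.1 ++ [char], st.2))
      (acc, comb)).1 = acc ++ pvInterleave (cs.splitOn '?') comb := by
  induction cs with
  | nil =>
    intro comb acc h
    simp only [List.count_nil] at h
    cases comb with
    | nil => simp [pvInterleave, List.splitOn]
    | cons d t => simp at h
  | cons c cs ih =>
    intro comb acc h
    by_cases hc : c = '?'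
    · subst hc
      cases comb with
      | nil => simp at h
      | cons d comb' =>
        have h' : cs.count '?' = comb'.length := by
          simp at h; omega
        rw [List.foldl_cons]
        simp only [beq_self_eq_true, if_true, List.headD_cons, List.drop_succ_cons,
          List.drop_zero]
        rw [ih comb' (acc ++ PySem.Int.toChars d) h']
        rw [pv_splitOn_cons_sep]
        obtain ⟨p0, rest, hpr⟩ := List.exists_cons_of_ne_nil (pv_splitOn_ne_nil cs)
        rw [hpr]
        simp [pvInterleave, List.flatMap_cons]
    · have hcb : (c == '?') = false := by simp [hc]
      have h' : cs.count '?' = comb.length := by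
        simpa [List.count_cons, hcb] using h
      rw [List.foldl_cons]
      simp only [hcb, Bool.false_eq_true, if_false]
      rw [ih comb (acc ++ [c]) h']
      rw [pv_splitOn_cons_ne c cs hcb]
      obtain ⟨p0, rest, hpr⟩ := List.exists_cons_of_ne_nil (pv_splitOn_ne_nil cs)
      rw [hpr]
      simp [pvInterleave]

-- ===== VERDICT (by name: the statement is the Claim_ definition above) =====
theorem create_wagonnumber_spec : Claim_equal_create_wagonnumber := by
  intro p comb _ hpre
  unfold Spec_create_wagonnumber
  rw [pv_alt_eq]
  unfold create_wagonnumber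
  rw [pv_main p.toList comb [] hpre]
  simp
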